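-- pv_equiv track=rewrite | github.com/gumaonelove/ege_2021 | rabish/Алгоритмики/Покрыть отрезки точками.py | PointsCover
-- ===== SOURCE A (Python) =====
-- def PointsCover(mt, ma):
--     count = 0
--     A = []
--     for x in ma:
--         for y in mt:
--             if y[0] <= x <= y[1]:
--                 count += 1
--         else:
--             if count == len(mt):
--                 A.append(x)
--             count = 0
--     return A
-- ===== SOURCE B (Python) =====
-- def PointsCover(mt, ma):
--     if not mt:
--         return list(ma)
--     lo = max(y[0] for y in mt)
--     hi = min(y[1] for y in mt)
--     return [x for x in ma if lo <= x <= hi]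
-- ===== Notes on version B (the rewrite author's own statement) =====
-- stated objective: faster
-- what changed: Instead of counting, for every point, how many segments contain it, B computes the common intersection [max left, min right] once and tests each point against that single interval.
import Mathlib
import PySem

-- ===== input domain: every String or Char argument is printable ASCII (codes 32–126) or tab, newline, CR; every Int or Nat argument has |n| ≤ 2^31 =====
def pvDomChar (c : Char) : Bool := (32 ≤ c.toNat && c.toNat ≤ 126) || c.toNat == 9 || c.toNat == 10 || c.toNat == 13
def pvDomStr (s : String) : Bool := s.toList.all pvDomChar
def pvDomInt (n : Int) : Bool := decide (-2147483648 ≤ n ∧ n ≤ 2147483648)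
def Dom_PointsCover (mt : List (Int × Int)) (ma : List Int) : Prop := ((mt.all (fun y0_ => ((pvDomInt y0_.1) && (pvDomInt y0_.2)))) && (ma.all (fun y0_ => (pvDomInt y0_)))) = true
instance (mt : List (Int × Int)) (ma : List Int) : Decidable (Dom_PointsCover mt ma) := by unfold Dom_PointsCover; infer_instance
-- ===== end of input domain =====

-- B computes the common intersection [max left, min right] once and tests each point against it,
-- instead of A's per-point count over all segments (objective: faster, asymptotic).

-- ===== PORT A =====
-- state (count, A); the inner loop adds to count, then x is kept iff count = len(mt), and count resets to 0
def pvStepA (mt : List (Int × Int)) (st : Int × List Int) (x : Int) : Int × List Int :=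
  let count := mt.foldl (fun c y => if y.1 ≤ x ∧ x ≤ y.2 then c + 1 else c) st.1
  (0, if count = (mt.length : Int) then st.2 ++ [x] else st.2)

def PointsCover (mt : List (Int × Int)) (ma : List Int) : List Int :=
  (ma.foldl (pvStepA mt) (0, [])).2

-- ===== PORT B =====
def PointsCover_alt (mt : List (Int × Int)) (ma : List Int) : List Int :=
  match mt with
  | [] => ma
  | (a, b) :: rest =>
    let lo := rest.foldl (fun m y => max m y.1) a
    let hi := rest.foldl (fun m y => min m y.2) b
    ma.filter (fun x => decide (lo ≤ x ∧ x ≤ hi))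

-- ===== PRECONDITION & SPEC =====
def Spec_PointsCover (mt : List (Int × Int)) (ma : List Int) (out : List Int) : Prop := out = PointsCover_alt mt ma
instance (mt : List (Int × Int)) (ma : List Int) (out : List Int) : Decidable (Spec_PointsCover mt ma out) := by unfold Spec_PointsCover; infer_instance

-- ===== CLAIM (what is proved, stated in full; the proofs are below) =====
def Claim_equal_PointsCover : Prop := ∀ (mt : List (Int × Int)) (ma : List Int), Dom_PointsCover mt ma → Spec_PointsCover mt ma (PointsCover mt ma)

-- ===== LEMMAS AND PROOFS =====

-- the inner counting loop counts the segments containing x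
theorem pv_count_eq (mt : List (Int × Int)) (x c : Int) :
    mt.foldl (fun c y => if y.1 ≤ x ∧ x ≤ y.2 then c + 1 else c) c
      = c + (mt.countP (fun y => decide (y.1 ≤ x ∧ x ≤ y.2)) : Int) := by
  induction mt generalizing c with
  | nil => simp
  | cons y t ih =>
    simp only [List.foldl_cons, List.countP_cons]
    by_cases h : y.1 ≤ x ∧ x ≤ y.2 <;> simp [h, ih] <;> ring

theorem pv_max_le (rest : List (Int × Int)) (a x : Int) :
    (rest.foldl (fun m y => max m y.1) a ≤ x) ↔ (a ≤ x ∧ ∀ y ∈ rest, y.1 ≤ x) := by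
  induction rest generalizing a with
  | nil => simp
  | cons y t ih =>
    simp only [List.foldl_cons, ih, max_le_iff, List.mem_cons]
    constructor
    · rintro ⟨⟨h1, h2⟩, h3⟩; exact ⟨h1, fun z hz => by rcases hz with rfl | hz; exact h2; exact h3 z hz⟩
    · rintro ⟨h1, h2⟩; exact ⟨⟨h1, h2 y (Or.inl rfl)⟩, fun z hz => h2 z (Or.inr hz)⟩

theorem pv_le_min (rest : List (Int × Int)) (b x : Int) :
    (x ≤ rest.foldl (fun m y => min m y.2) b) ↔ (x ≤ b ∧ ∀ y ∈ rest, x ≤ y.2) := by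
  induction rest generalizing b with
  | nil => simp
  | cons y t ih =>
    simp only [List.foldl_cons, ih, le_min_iff, List.mem_cons]
    constructor
    · rintro ⟨⟨h1, h2⟩, h3⟩; exact ⟨h1, fun z hz => by rcases hz with rfl | hz; exact h2; exact h3 z hz⟩
    · rintro ⟨h1, h2⟩; exact ⟨⟨h1, h2 y (Or.inl rfl)⟩, fun z hz => h2 z (Or.inr hz)⟩

-- A's outer loop (entered with count = 0) is a filter by "count = len(mt)"
theorem pv_A_fold (mt : List (Int × Int)) (ma : List Int) (acc : List Int) :
    (ma.foldl (pvStepA mt) (0, acc)).2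
    = acc ++ ma.filter (fun x => (mt.countP (fun y => decide (y.1 ≤ x ∧ x ≤ y.2)) : Int) = (mt.length : Int)) := by
  induction ma generalizing acc with
  | nil => simp
  | cons x t ih =>
    rw [List.foldl_cons, List.filter_cons]
    have hstep : pvStepA mt (0, acc) x
      = (0, if (mt.countP (fun y => decide (y.1 ≤ x ∧ x ≤ y.2)) : Int) = (mt.length : Int)
            then acc ++ [x] else acc) := by
      unfold pvStepA
      rw [show ((0 : Int), acc).1 = (0 : Int) from rfl, pv_count_eq, zero_add]
    rw [hstep, ih]
    by_cases h : (mt.countP (fun y => decide (y.1 ≤ x ∧ x ≤ y.2)) : Int) = (mt.length : Int)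
    · rw [if_pos h, if_pos (by simpa using h : decide ((mt.countP (fun y => decide (y.1 ≤ x ∧ x ≤ y.2)) : Int) = (mt.length : Int)) = true)]
      simp
    · rw [if_neg h, if_neg (by simpa using h : ¬ decide ((mt.countP (fun y => decide (y.1 ≤ x ∧ x ≤ y.2)) : Int) = (mt.length : Int)) = true)]

-- ===== VERDICT =====
theorem PointsCover_spec : Claim_equal_PointsCover := by
  intro mt ma _
  unfold Spec_PointsCover PointsCover PointsCover_alt
  rw [pv_A_fold]
  match mt with
  | [] => simp
  | (a, b) :: rest =>
    simp only [List.nil_append]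
    apply List.filter_congr
    intro x _
    have hcount : ((((a, b) :: rest).countP (fun y => decide (y.1 ≤ x ∧ x ≤ y.2)) : Int)
        = (((a, b) :: rest).length : Int)) ↔ ∀ y ∈ (a, b) :: rest, y.1 ≤ x ∧ x ≤ y.2 := by
      rw [Int.natCast_inj, List.countP_eq_length]
      simp
    simp only [decide_eq_decide, hcount, pv_max_le, pv_le_min, List.mem_cons]
    constructor
    · intro h
      refine ⟨⟨(h (a,b) (Or.inl rfl)).1, fun y hy => (h y (Or.inr hy)).1⟩,
             ⟨(h (a,b) (Or.inl rfl)).2, fun y hy => (h y (Or.inr hy)).2⟩⟩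
    · rintro ⟨⟨h1, h2⟩, ⟨h3, h4⟩⟩ y hy
      rcases hy with rfl | hy
      · exact ⟨h1, h3⟩
      · exact ⟨h2 y hy, h4 y hy⟩
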